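-- pv_equiv track=rewrite | github.com/dimmaik-tech/bond-analyzer-ai | app.py | find_matching_profile_for_bank
-- ===== SOURCE A (Python) =====
-- def find_matching_profile_for_bank(bank_name: str, profile_names: list) -> str:
--     if bank_name == "N/A":
--         return "N/A"
--
--     bank_lower = bank_name.lower()
--     for pname in profile_names:
--         if pname.lower() == bank_lower:
--             return pname
--
--     for pname in profile_names:
--         if bank_lower in pname.lower() or pname.lower() in bank_lower:
--             return pname
--
--     return "N/A"
-- ===== SOURCE B (Python) =====
-- def find_matching_profile_for_bank(bank_name: str, profile_names: list) -> str:
--     if bank_name == "N/A":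
--         return "N/A"
--     bank_lower = bank_name.lower()
--     first_substring = None
--     for pname in profile_names:
--         pname_lower = pname.lower()
--         if pname_lower == bank_lower:
--             return pname
--         if first_substring is None and (bank_lower in pname_lower or pname_lower in bank_lower):
--             first_substring = pname
--     return first_substring if first_substring is not None else "N/A"
-- ===== Notes on version B (the rewrite author's own statement) =====
-- stated objective: alternative
-- what changed: Replaced A's two sequential scans (exact-match pass, then substring pass) by a single pass that returns immediately on an exact match and remembers the first substring candidate in an accumulator.
import Mathlib
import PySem

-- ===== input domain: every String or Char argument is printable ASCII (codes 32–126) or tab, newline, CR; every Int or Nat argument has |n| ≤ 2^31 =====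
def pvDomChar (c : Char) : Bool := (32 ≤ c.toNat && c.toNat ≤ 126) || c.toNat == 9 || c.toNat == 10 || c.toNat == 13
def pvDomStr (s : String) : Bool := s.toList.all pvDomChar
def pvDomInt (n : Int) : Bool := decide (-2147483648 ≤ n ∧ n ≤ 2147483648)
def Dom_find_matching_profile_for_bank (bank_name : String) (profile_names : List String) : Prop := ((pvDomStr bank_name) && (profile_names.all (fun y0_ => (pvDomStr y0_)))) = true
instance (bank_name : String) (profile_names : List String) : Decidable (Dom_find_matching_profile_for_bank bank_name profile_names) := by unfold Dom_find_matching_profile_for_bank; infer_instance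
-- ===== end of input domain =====

-- B merges A's two sequential scans into one pass with a first-substring accumulator (objective: alternative decomposition, same cost).

-- ===== PORT A =====
-- first for-loop of A: return first exact (case-insensitive) match
def pvA_exactLoop (bank_lower : String) : List String → Option String
  | [] => none
  | p :: ps =>
    if PySem.Str.lower p = bank_lower then some p else pvA_exactLoop bank_lower ps

-- second for-loop of A: return first substring match (either direction)
def pvA_subLoop (bank_lower : String) : List String → Option String
  | [] => none
  | p :: ps =>
    if PySem.Str.isIn bank_lower (PySem.Str.lower p) || PySem.Str.isIn (PySem.Str.lower p) bank_lower
    then some p else pvA_subLoop bank_lower ps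

def find_matching_profile_for_bank (bank_name : String) (profile_names : List String) : String :=
  if bank_name = "N/A" then "N/A"
  else
    let bank_lower := PySem.Str.lower bank_name
    match pvA_exactLoop bank_lower profile_names with
    | some p => p
    | none =>
      match pvA_subLoop bank_lower profile_names with
      | some p => p
      | none => "N/A"

-- ===== PORT B =====
-- B's single pass: return on exact match, remember first substring candidate
def pvB_loop (bank_lower : String) (first_substring : Option String) : List String → String
  | [] =>
    match first_substring with
    | some q => q
    | none => "N/A"
  | p :: ps =>
    let pl := PySem.Str.lower p
    if pl = bank_lower then p
    else if first_substring.isNone &&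
            (PySem.Str.isIn bank_lower pl || PySem.Str.isIn pl bank_lower)
    then pvB_loop bank_lower (some p) ps
    else pvB_loop bank_lower first_substring ps

def find_matching_profile_for_bank_alt (bank_name : String) (profile_names : List String) : String :=
  if bank_name = "N/A" then "N/A"
  else pvB_loop (PySem.Str.lower bank_name) none profile_names

-- ===== PRECONDITION & SPEC =====
def Spec_find_matching_profile_for_bank (bank_name : String) (profile_names : List String) (out : String) : Prop := out = find_matching_profile_for_bank_alt bank_name profile_names
instance (bank_name : String) (profile_names : List String) (out : String) : Decidable (Spec_find_matching_profile_for_bank bank_name profile_names out) := by unfold Spec_find_matching_profile_for_bank; infer_instance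

-- ===== CLAIM (what is proved, stated in full; the proofs are below) =====
def Claim_equal_find_matching_profile_for_bank : Prop := ∀ (bank_name : String) (profile_names : List String), Dom_find_matching_profile_for_bank bank_name profile_names → Spec_find_matching_profile_for_bank bank_name profile_names (find_matching_profile_for_bank bank_name profile_names)

-- ===== LEMMAS AND PROOFS =====

-- invariant of B's single pass: it equals A's exact-match loop, falling back to the
-- already-remembered candidate first, then to A's substring loop over the remaining list
theorem pvB_loop_eq (bank_lower : String) (xs : List String) (fs : Option String) :
    pvB_loop bank_lower fs xs =
      match pvA_exactLoop bank_lower xs with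
      | some p => p
      | none =>
        match fs with
        | some q => q
        | none =>
          match pvA_subLoop bank_lower xs with
          | some p => p
          | none => "N/A" := by
  induction xs generalizing fs with
  | nil => cases fs <;> simp [pvB_loop, pvA_exactLoop, pvA_subLoop]
  | cons p ps ih =>
    simp only [pvB_loop, pvA_exactLoop, pvA_subLoop]
    by_cases hx : PySem.Str.lower p = bank_lower
    · simp [hx]
    · simp only [hx, if_false]
      by_cases hsub : PySem.Str.isIn bank_lower (PySem.Str.lower p) = true ∨
            PySem.Str.isIn (PySem.Str.lower p) bank_lower = true
      · simp only [PySem.Str.isIn_eq, PySem.Str.toList_lower] at hsub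
        cases fs with
        | none => simp [ih, hsub]
        | some q => simp [ih, hsub]
      · simp only [PySem.Str.isIn_eq, PySem.Str.toList_lower] at hsub
        cases fs with
        | none => simp [ih, hsub]
        | some q => simp [ih, hsub]

theorem find_matching_profile_for_bank_spec : Claim_equal_find_matching_profile_for_bank := by
  intro bank_name profile_names _
  unfold Spec_find_matching_profile_for_bank
  unfold find_matching_profile_for_bank find_matching_profile_for_bank_alt
  by_cases h : bank_name = "N/A"
  · simp [h]
  · simp only [h, if_false, pvB_loop_eq]
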